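-- pv_equiv track=rewrite | github.com/iikaro/advent-of-code-2024 | solution/day2.py | check_level_is_safe_with_tolerance
-- ===== SOURCE A (Python) =====
-- import copy
--
-- def check_numbers_are_monotonic(report: list[int]) -> list[int]:
--     is_increasing = report[1] - report[0] > 0
--     checked_levels = []
--     for i in range(2, len(report)):
--         if (report[i] > report[i - 1]) == is_increasing:
--             checked_levels.append(report[i])
--     return checked_levels
--
-- def check_distance(report: list[int]) -> list[int]:
--     checked_levels = []
--     for i in range(1, len(report)):
--         if 0 < abs(report[i] - report[i - 1]) <= 3:
--             checked_levels.append(report[i])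
--     return checked_levels
--
-- def check_level_is_safe(report: list[int]) -> bool:
--     is_distance_safe = len(check_distance(report)) == len(report) - 1
--     is_monotonicity_safe = len(check_numbers_are_monotonic(report)) == len(report) - 2
--     return is_distance_safe and is_monotonicity_safe
--
-- def check_level_is_safe_with_tolerance(report: list[int]) -> bool:
--     # Check if report is unsafe
--     if not check_level_is_safe(report):
--         # Try to check if the report, without one level, becomes safe
--         for i in range(0, len(report)):
--             new_report = copy.deepcopy(report)
--             new_report.pop(i)
--             if check_level_is_safe(new_report):
--                 return True
--     return check_level_is_safe(report)
-- ===== SOURCE B (Python) =====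
-- def check_level_is_safe_with_tolerance(report: list[int]) -> bool:
--     # O(n): prefix/suffix "all diffs in range" tables; each one-level removal is then O(1).
--     n = len(report)
--     if n < 2:
--         return True
--     diffs = [report[i + 1] - report[i] for i in range(n - 1)]
--     for lo, hi in ((1, 3), (-3, -1)):
--         ok = [lo <= d <= hi for d in diffs]
--         pref = [True]
--         for b in ok:
--             pref.append(pref[-1] and b)
--         suf = [True]
--         for b in reversed(ok):
--             suf.append(suf[-1] and b)
--         suf.reverse()
--         if pref[n - 1]:
--             return True
--         if suf[1] or pref[n - 2]:
--             return True
--         for k in range(1, n - 1):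
--             if pref[k - 1] and suf[k + 1] and lo <= diffs[k - 1] + diffs[k] <= hi:
--                 return True
--     return False
-- ===== Notes on version B (the rewrite author's own statement) =====
-- stated objective: faster
-- what changed: B computes the difference list once and builds prefix/suffix all-in-range tables per direction, so the full check and every one-level removal are O(1) each (removal = prefix ok + merged diff ok + suffix ok), instead of A's re-running the two counting scans on a deep copy with one element popped for every index.
import Mathlib
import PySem

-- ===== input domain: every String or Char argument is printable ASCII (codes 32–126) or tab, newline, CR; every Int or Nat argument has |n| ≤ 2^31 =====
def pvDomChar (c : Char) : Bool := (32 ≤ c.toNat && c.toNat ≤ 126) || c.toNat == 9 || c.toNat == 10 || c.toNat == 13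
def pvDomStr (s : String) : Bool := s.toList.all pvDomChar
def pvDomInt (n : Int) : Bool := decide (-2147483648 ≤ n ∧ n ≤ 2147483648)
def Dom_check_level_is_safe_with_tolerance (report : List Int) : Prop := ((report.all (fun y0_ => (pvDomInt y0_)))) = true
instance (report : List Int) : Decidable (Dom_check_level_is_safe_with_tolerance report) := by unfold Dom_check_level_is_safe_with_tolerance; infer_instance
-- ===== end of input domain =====

-- B replaces A's per-index deep-copy-and-rescan (O(n^2)) by one diff list with prefix/suffix
-- all-in-range tables per direction, making the check and each one-level removal O(1) (O(n) total).

-- ===== PORT A =====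
def pvA_check_numbers_are_monotonic (report : List Int) : List Int :=
  let is_increasing : Bool :=
    decide (0 < PySem.List.pyGetD report 1 0 - PySem.List.pyGetD report 0 0)
  (PySem.List.pyRange 2 (PySem.List.len report) 1).foldl
    (fun checked_levels i =>
      if (decide (PySem.List.pyGetD report (i-1) 0 < PySem.List.pyGetD report i 0)) = is_increasing
      then checked_levels ++ [PySem.List.pyGetD report i 0]
      else checked_levels) []

def pvA_check_distance (report : List Int) : List Int :=
  (PySem.List.pyRange 1 (PySem.List.len report) 1).foldl
    (fun checked_levels i =>
      if 0 < |PySem.List.pyGetD report i 0 - PySem.List.pyGetD report (i-1) 0| ∧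
         |PySem.List.pyGetD report i 0 - PySem.List.pyGetD report (i-1) 0| ≤ 3
      then checked_levels ++ [PySem.List.pyGetD report i 0]
      else checked_levels) []

def pvA_check_level_is_safe (report : List Int) : Bool :=
  let is_distance_safe :=
    decide (PySem.List.len (pvA_check_distance report) = PySem.List.len report - 1)
  let is_monotonicity_safe :=
    decide (PySem.List.len (pvA_check_numbers_are_monotonic report) = PySem.List.len report - 2)
  is_distance_safe && is_monotonicity_safe

def check_level_is_safe_with_tolerance (report : List Int) : Bool :=
  if !pvA_check_level_is_safe report then
    if (PySem.List.pyRange 0 (PySem.List.len report) 1).any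
        (fun i => pvA_check_level_is_safe (((PySem.List.pop? report i).getD (0, [])).2))
    then true
    else pvA_check_level_is_safe report
  else pvA_check_level_is_safe report

-- ===== PORT B =====
-- one direction (lo,hi): full check and every removal answered from prefix/suffix tables
def pvB_dir (lo hi : Int) (n : Nat) (diffs : List Int) : Bool :=
  let ok := diffs.map (fun d => decide (lo ≤ d ∧ d ≤ hi))
  let pref := List.scanl (fun a b => a && b) true ok
  let suf := (List.scanl (fun a b => a && b) true ok.reverse).reverse
  if pref.getD (n - 1) true then true
  else if suf.getD 1 true || pref.getD (n - 2) true then true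
  else (List.range (n - 2)).any (fun k0 =>
    pref.getD k0 true && suf.getD (k0 + 2) true &&
      decide (lo ≤ diffs.getD k0 0 + diffs.getD (k0 + 1) 0 ∧
              diffs.getD k0 0 + diffs.getD (k0 + 1) 0 ≤ hi))

def check_level_is_safe_with_tolerance_alt (report : List Int) : Bool :=
  let n := report.length
  if n < 2 then true
  else
    let diffs := (List.range (n - 1)).map (fun i => report.getD (i + 1) 0 - report.getD i 0)
    pvB_dir 1 3 n diffs || pvB_dir (-3) (-1) n diffs

-- ===== PRECONDITION & SPEC =====
-- Pre_ excludes exactly the inputs where Python A raises IndexError: reports shorter than 2,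
-- and length-2 reports whose single step is unsafe (the removal loop then rechecks a length-1 list).
def Pre_check_level_is_safe_with_tolerance (report : List Int) : Prop :=
  3 ≤ report.length ∨
    (report.length = 2 ∧ 1 ≤ |report.getD 1 0 - report.getD 0 0| ∧
      |report.getD 1 0 - report.getD 0 0| ≤ 3)
instance (report : List Int) : Decidable (Pre_check_level_is_safe_with_tolerance report) := by
  unfold Pre_check_level_is_safe_with_tolerance; infer_instance

def pvWitness_check_level_is_safe_with_tolerance : List Int := [1, 2, 3]

def Spec_check_level_is_safe_with_tolerance (report : List Int) (out : Bool) : Prop :=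
  out = check_level_is_safe_with_tolerance_alt report
instance (report : List Int) (out : Bool) :
    Decidable (Spec_check_level_is_safe_with_tolerance report out) := by
  unfold Spec_check_level_is_safe_with_tolerance; infer_instance

-- ===== CLAIM (what is proved, stated in full; the proofs are below) =====
def Claim_equal_check_level_is_safe_with_tolerance : Prop :=
  ∀ (report : List Int), Dom_check_level_is_safe_with_tolerance report →
    Pre_check_level_is_safe_with_tolerance report →
    Spec_check_level_is_safe_with_tolerance report (check_level_is_safe_with_tolerance report)

-- ===== LEMMAS AND PROOFS =====

-- the j-th consecutive difference of a report
def pvD (r : List Int) (j : Nat) : Int := r.getD (j + 1) 0 - r.getD j 0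

-- "every difference of r lies in [lo,hi]"
def pvAll (lo hi : Int) (r : List Int) : Prop :=
  ∀ j, j + 1 < r.length → lo ≤ pvD r j ∧ pvD r j ≤ hi

theorem pv_scanl_getD (l : List Bool) (b : Bool) (i : Nat) (h : i ≤ l.length) :
    (List.scanl (fun a c => a && c) b l).getD i true = (b && (l.take i).all id) := by
  induction l generalizing b i with
  | nil => simp at h; subst h; simp [List.scanl]
  | cons x xs ih =>
    cases i with
    | zero => simp [List.scanl_cons]
    | succ i =>
      rw [List.scanl_cons]
      simp only [List.getD_cons_succ, List.take_succ_cons, List.all_cons]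
      rw [ih (b && x) i (by simpa using h)]
      simp [Bool.and_assoc]

theorem pv_pref (P : Nat → Prop) [DecidablePred P] (m i : Nat) (h : i ≤ m) :
    ((List.scanl (fun a c => a && c) true ((List.range m).map (fun j => decide (P j)))).getD i true = true
      ↔ ∀ j < i, P j) := by
  rw [pv_scanl_getD _ _ i (by simpa using h)]
  rw [← List.map_take, List.take_range, Nat.min_eq_left h]
  simp [List.all_eq_true, List.mem_range]

theorem pv_suf (P : Nat → Prop) [DecidablePred P] (m i : Nat) (h : i ≤ m) :
    (((List.scanl (fun a c => a && c) true ((List.range m).map (fun j => decide (P j))).reverse).reverse).getD i true = true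
      ↔ ∀ j, i ≤ j → j < m → P j) := by
  have hlen2 : (List.scanl (fun a c : Bool => a && c) true ((List.range m).map (fun j => decide (P j))).reverse).length = m + 1 := by
    rw [List.length_scanl]; simp
  rw [List.getD_eq_getElem?_getD, List.getElem?_reverse (by omega), ← List.getD_eq_getElem?_getD]
  rw [hlen2]
  have e1 : m + 1 - 1 - i = m - i := by omega
  rw [e1, pv_scanl_getD _ _ (m - i) (by simp)]
  rw [List.take_reverse, List.all_reverse]
  simp only [List.length_map, List.length_range]
  have e2 : m - (m - i) = i := by omega
  rw [e2, ← List.map_drop, List.range_eq_range', List.drop_range']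
  simp only [Bool.true_and, List.all_eq_true, List.mem_map, List.mem_range']
  constructor
  · intro hh j h1 h2
    exact of_decide_eq_true (hh (decide (P j)) ⟨j, ⟨j - i, by omega, by omega⟩, rfl⟩)
  · rintro hh x ⟨j, ⟨k, hk, rfl⟩, rfl⟩
    exact decide_eq_true (hh _ (by omega) (by omega))

theorem pv_getD_eraseIdx (r : List Int) (k j : Nat) :
    (r.eraseIdx k).getD j 0 = if j < k then r.getD j 0 else r.getD (j + 1) 0 := by
  rw [List.getD_eq_getElem?_getD, List.getElem?_eraseIdx]
  split <;> rw [← List.getD_eq_getElem?_getD]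

theorem pvD_erase_lt (r : List Int) (k j : Nat) (h : j + 1 < k) :
    pvD (r.eraseIdx k) j = pvD r j := by
  unfold pvD; rw [pv_getD_eraseIdx, pv_getD_eraseIdx]
  rw [if_pos h, if_pos (by omega)]

theorem pvD_erase_ge (r : List Int) (k j : Nat) (h : k ≤ j) :
    pvD (r.eraseIdx k) j = pvD r (j + 1) := by
  unfold pvD; rw [pv_getD_eraseIdx, pv_getD_eraseIdx]
  rw [if_neg (by omega), if_neg (by omega)]

theorem pvD_erase_eq (r : List Int) (k : Nat) (h : 1 ≤ k) :
    pvD (r.eraseIdx k) (k - 1) = pvD r (k - 1) + pvD r k := by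
  unfold pvD; rw [pv_getD_eraseIdx, pv_getD_eraseIdx]
  have e : k - 1 + 1 = k := by omega
  rw [e, if_neg (by omega), if_pos (by omega)]
  ring

theorem pv_len_erase (r : List Int) (k : Nat) (h : k < r.length) :
    (r.eraseIdx k).length = r.length - 1 := by
  rw [List.length_eraseIdx]; simp [h]

theorem pv_erase0 (lo hi : Int) (r : List Int) (h : 1 ≤ r.length) :
    pvAll lo hi (r.eraseIdx 0) ↔ ∀ j, 1 ≤ j → j + 1 < r.length → lo ≤ pvD r j ∧ pvD r j ≤ hi := by
  unfold pvAll
  rw [pv_len_erase r 0 (by omega)]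
  constructor
  · intro hh j h1 h2
    have := hh (j - 1) (by omega)
    rwa [pvD_erase_ge r 0 (j-1) (by omega), Nat.sub_add_cancel h1] at this
  · intro hh j hj
    rw [pvD_erase_ge r 0 j (by omega)]
    exact hh (j + 1) (by omega) (by omega)

theorem pv_eraseLast (lo hi : Int) (r : List Int) (h : 1 ≤ r.length) :
    pvAll lo hi (r.eraseIdx (r.length - 1)) ↔
      ∀ j, j + 1 < r.length - 1 → lo ≤ pvD r j ∧ pvD r j ≤ hi := by
  unfold pvAll
  rw [pv_len_erase r (r.length - 1) (by omega)]
  constructor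
  · intro hh j hj
    have := hh j hj
    rwa [pvD_erase_lt r _ j (by omega)] at this
  · intro hh j hj
    rw [pvD_erase_lt r _ j (by omega)]
    exact hh j hj

theorem pv_eraseMid (lo hi : Int) (r : List Int) (k : Nat) (h1 : 1 ≤ k) (h2 : k + 1 < r.length) :
    pvAll lo hi (r.eraseIdx k) ↔
      (∀ j, j + 1 < k → lo ≤ pvD r j ∧ pvD r j ≤ hi) ∧
      (lo ≤ pvD r (k - 1) + pvD r k ∧ pvD r (k - 1) + pvD r k ≤ hi) ∧
      (∀ j, k + 1 ≤ j → j + 1 < r.length → lo ≤ pvD r j ∧ pvD r j ≤ hi) := by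
  unfold pvAll
  rw [pv_len_erase r k (by omega)]
  constructor
  · intro hh
    refine ⟨fun j hj => ?_, ?_, fun j hj1 hj2 => ?_⟩
    · have := hh j (by omega)
      rwa [pvD_erase_lt r k j hj] at this
    · have := hh (k - 1) (by omega)
      rwa [pvD_erase_eq r k h1] at this
    · have := hh (j - 1) (by omega)
      rwa [pvD_erase_ge r k (j - 1) (by omega), Nat.sub_add_cancel (by omega)] at this
      
  · rintro ⟨ha, hb, hc⟩ j hj
    rcases lt_trichotomy (j + 1) k with hlt | heq | hgt
    · rw [pvD_erase_lt r k j hlt]; exact ha j hlt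
    · have : j = k - 1 := by omega
      subst this
      rw [pvD_erase_eq r k h1]; exact hb
    · rw [pvD_erase_ge r k j (by omega)]
      exact hc (j + 1) (by omega) (by omega)

theorem pvB_dir_iff (lo hi : Int) (r : List Int) (hn : 3 ≤ r.length) :
    pvB_dir lo hi r.length ((List.range (r.length - 1)).map (fun i => r.getD (i + 1) 0 - r.getD i 0)) = true ↔
      pvAll lo hi r ∨ ∃ k < r.length, pvAll lo hi (r.eraseIdx k) := by
  have hok : ((List.range (r.length - 1)).map (fun i => r.getD (i + 1) 0 - r.getD i 0)).map
      (fun d => decide (lo ≤ d ∧ d ≤ hi)) =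
      (List.range (r.length - 1)).map (fun j => decide (lo ≤ pvD r j ∧ pvD r j ≤ hi)) := by
    rw [List.map_map]; rfl
  have hc1 : (List.scanl (fun a c => a && c) true
      ((List.range (r.length - 1)).map (fun j => decide (lo ≤ pvD r j ∧ pvD r j ≤ hi)))).getD (r.length - 1) true = true
      ↔ pvAll lo hi r := by
    rw [pv_pref (fun j => lo ≤ pvD r j ∧ pvD r j ≤ hi) (r.length - 1) (r.length - 1) (le_refl _)]
    unfold pvAll
    exact ⟨fun hh j hj => hh j (by omega), fun hh j hj => hh j (by omega)⟩
  have hc2a : (((List.scanl (fun a c => a && c) true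
      ((List.range (r.length - 1)).map (fun j => decide (lo ≤ pvD r j ∧ pvD r j ≤ hi))).reverse).reverse).getD 1 true = true)
      ↔ pvAll lo hi (r.eraseIdx 0) := by
    rw [pv_suf (fun j => lo ≤ pvD r j ∧ pvD r j ≤ hi) (r.length - 1) 1 (by omega)]
    rw [pv_erase0 lo hi r (by omega)]
    exact ⟨fun hh j h1 h2 => hh j h1 (by omega), fun hh j h1 h2 => hh j h1 (by omega)⟩
  have hc2b : ((List.scanl (fun a c => a && c) true
      ((List.range (r.length - 1)).map (fun j => decide (lo ≤ pvD r j ∧ pvD r j ≤ hi)))).getD (r.length - 2) true = true)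
      ↔ pvAll lo hi (r.eraseIdx (r.length - 1)) := by
    rw [pv_pref (fun j => lo ≤ pvD r j ∧ pvD r j ≤ hi) (r.length - 1) (r.length - 2) (by omega)]
    rw [pv_eraseLast lo hi r (by omega)]
    exact ⟨fun hh j hj => hh j (by omega), fun hh j hj => hh j (by omega)⟩
  have hc3 : ∀ k0, k0 < r.length - 2 →
      ((((List.scanl (fun a c => a && c) true
          ((List.range (r.length - 1)).map (fun j => decide (lo ≤ pvD r j ∧ pvD r j ≤ hi)))).getD k0 true &&
        (((List.scanl (fun a c => a && c) true
          ((List.range (r.length - 1)).map (fun j => decide (lo ≤ pvD r j ∧ pvD r j ≤ hi))).reverse).reverse).getD (k0 + 2) true) &&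
        decide (lo ≤ ((List.range (r.length - 1)).map (fun i => r.getD (i + 1) 0 - r.getD i 0)).getD k0 0 +
                  ((List.range (r.length - 1)).map (fun i => r.getD (i + 1) 0 - r.getD i 0)).getD (k0 + 1) 0 ∧
                ((List.range (r.length - 1)).map (fun i => r.getD (i + 1) 0 - r.getD i 0)).getD k0 0 +
                  ((List.range (r.length - 1)).map (fun i => r.getD (i + 1) 0 - r.getD i 0)).getD (k0 + 1) 0 ≤ hi)) = true)
      ↔ pvAll lo hi (r.eraseIdx (k0 + 1))) := by
    intro k0 hk0
    rw [PySem.List.getD_map_range (fun i => r.getD (i + 1) 0 - r.getD i 0) (r.length - 1) k0 0 (by omega)]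
    rw [PySem.List.getD_map_range (fun i => r.getD (i + 1) 0 - r.getD i 0) (r.length - 1) (k0 + 1) 0 (by omega)]
    rw [Bool.and_eq_true, Bool.and_eq_true, decide_eq_true_eq]
    rw [pv_pref (fun j => lo ≤ pvD r j ∧ pvD r j ≤ hi) (r.length - 1) k0 (by omega)]
    rw [pv_suf (fun j => lo ≤ pvD r j ∧ pvD r j ≤ hi) (r.length - 1) (k0 + 2) (by omega)]
    rw [pv_eraseMid lo hi r (k0 + 1) (by omega) (by omega)]
    constructor
    · rintro ⟨⟨ha, hb⟩, hm⟩
      refine ⟨fun j hj => ha j (by omega), ?_, fun j h1 h2 => hb j (by omega) (by omega)⟩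
      simp only [Nat.add_sub_cancel]
      unfold pvD
      omega
    · rintro ⟨ha, hm, hb⟩
      refine ⟨⟨fun j hj => ha j (by omega), fun j h1 h2 => hb j (by omega) (by omega)⟩, ?_⟩
      simp only [Nat.add_sub_cancel] at hm
      unfold pvD at hm
      omega
  simp only [pvB_dir]
  rw [hok]
  split_ifs with h1 h2
  · exact iff_of_true rfl (Or.inl (hc1.mp h1))
  · rcases Bool.or_eq_true_iff.mp h2 with ha | hb
    · exact iff_of_true rfl (Or.inr ⟨0, by omega, hc2a.mp ha⟩)
    · exact iff_of_true rfl (Or.inr ⟨r.length - 1, by omega, hc2b.mp hb⟩)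
  · rw [List.any_eq_true]
    constructor
    · rintro ⟨k0, hk0, hf⟩
      rw [List.mem_range] at hk0
      exact Or.inr ⟨k0 + 1, by omega, (hc3 k0 hk0).mp hf⟩
    · rintro (hall | ⟨k, hk, hkall⟩)
      · exact absurd (hc1.mpr hall) (by simpa using h1)
      · rcases eq_or_ne k 0 with rfl | hk0
        · exact absurd (Bool.or_eq_true_iff.mpr (Or.inl (hc2a.mpr hkall))) h2
        · rcases eq_or_ne k (r.length - 1) with rfl | hklast
          · exact absurd (Bool.or_eq_true_iff.mpr (Or.inr (hc2b.mpr hkall))) h2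
          · refine ⟨k - 1, List.mem_range.mpr (by omega), (hc3 (k - 1) (by omega)).mpr ?_⟩
            have e : k - 1 + 1 = k := by omega
            rw [e]
            exact hkall

-- length of this file's append-if accumulation loop (propositional ite form of the port)
theorem pv_loop_len {α : Type} (cond : Int → Prop) [DecidablePred cond] (g : Int → α)
    (l : List Int) (acc : List α) :
    (l.foldl (fun a i => if cond i then a ++ [g i] else a) acc).length
      = acc.length + l.countP (fun i => decide (cond i)) := by
  induction l generalizing acc with
  | nil => simp
  | cons x xs ih =>
    simp only [List.foldl_cons, List.countP_cons]
    by_cases hx : cond x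
    · rw [if_pos hx, ih]; simp [hx]; omega
    · rw [if_neg hx, ih]; simp [hx]

theorem pv_pyGetD_toNat (r : List Int) (i : Int) (h : 0 ≤ i) :
    PySem.List.pyGetD r i 0 = r.getD i.toNat 0 := by
  obtain ⟨n, rfl⟩ : ∃ n : Nat, i = (n : Int) := ⟨i.toNat, by omega⟩
  rw [PySem.List.pyGetD_natCast, Int.toNat_natCast]

theorem pvA_dist_iff (r : List Int) (h : 2 ≤ r.length) :
    (PySem.List.len (pvA_check_distance r) = PySem.List.len r - 1) ↔
      ∀ j, j + 1 < r.length → pvD r j ≠ 0 ∧ -3 ≤ pvD r j ∧ pvD r j ≤ 3 := by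
  unfold pvA_check_distance
  rw [PySem.List.len_eq, pv_loop_len]
  simp only [List.length_nil, Nat.zero_add, PySem.List.len_eq]
  have hlen : (PySem.List.pyRange 1 (r.length : Int) 1).length = r.length - 1 := by
    rw [PySem.List.length_pyRange_one]; omega
  have hle := List.countP_le_length
    (p := fun i => decide (0 < |PySem.List.pyGetD r i 0 - PySem.List.pyGetD r (i-1) 0| ∧
         |PySem.List.pyGetD r i 0 - PySem.List.pyGetD r (i-1) 0| ≤ 3))
    (l := PySem.List.pyRange 1 (r.length : Int) 1)
  rw [hlen] at hle
  constructor
  · intro hh j hj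
    have hcount : (PySem.List.pyRange 1 (r.length : Int) 1).countP
        (fun i => decide (0 < |PySem.List.pyGetD r i 0 - PySem.List.pyGetD r (i-1) 0| ∧
         |PySem.List.pyGetD r i 0 - PySem.List.pyGetD r (i-1) 0| ≤ 3)) =
        (PySem.List.pyRange 1 (r.length : Int) 1).length := by
      rw [hlen]; omega
    have hall := List.countP_eq_length.mp hcount
    have hmem : ((j : Int) + 1) ∈ PySem.List.pyRange 1 (r.length : Int) 1 := by
      rw [PySem.List.mem_pyRange_one]; omega
    have := hall _ hmem
    rw [decide_eq_true_eq] at this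
    rw [pv_pyGetD_toNat r _ (by omega), pv_pyGetD_toNat r _ (by omega)] at this
    have e1 : ((j : Int) + 1).toNat = j + 1 := by omega
    have e2 : ((j : Int) + 1 - 1).toNat = j := by omega
    rw [e1, e2] at this
    have habs : |pvD r j| = |r.getD (j+1) 0 - r.getD j 0| := rfl
    rw [abs_pos, abs_le] at this
    unfold pvD
    exact ⟨this.1, this.2.1, this.2.2⟩
  · intro hh
    have hall : ∀ i ∈ PySem.List.pyRange 1 (r.length : Int) 1,
        (fun i => decide (0 < |PySem.List.pyGetD r i 0 - PySem.List.pyGetD r (i-1) 0| ∧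
         |PySem.List.pyGetD r i 0 - PySem.List.pyGetD r (i-1) 0| ≤ 3)) i = true := by
      intro i hi
      rw [PySem.List.mem_pyRange_one] at hi
      rw [decide_eq_true_eq]
      rw [pv_pyGetD_toNat r _ (by omega), pv_pyGetD_toNat r _ (by omega)]
      have := hh (i.toNat - 1) (by omega)
      unfold pvD at this
      have e : i.toNat - 1 + 1 = i.toNat := by omega
      rw [e] at this
      have e2 : (i - 1).toNat = i.toNat - 1 := by omega
      rw [e2, abs_pos, abs_le]
      exact ⟨by omega, by omega, by omega⟩
    rw [List.countP_eq_length.mpr hall, hlen]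
    omega

theorem pvA_mono_iff (r : List Int) (h : 2 ≤ r.length) :
    (PySem.List.len (pvA_check_numbers_are_monotonic r) = PySem.List.len r - 2) ↔
      ∀ j, 1 ≤ j → j + 1 < r.length → (0 < pvD r j ↔ 0 < pvD r 0) := by
  unfold pvA_check_numbers_are_monotonic
  rw [PySem.List.len_eq, pv_loop_len]
  simp only [List.length_nil, Nat.zero_add, PySem.List.len_eq]
  have hlen : (PySem.List.pyRange 2 (r.length : Int) 1).length = r.length - 2 := by
    rw [PySem.List.length_pyRange_one]; omega
  have hinc : (decide (0 < PySem.List.pyGetD r 1 0 - PySem.List.pyGetD r 0 0)) =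
      decide (0 < pvD r 0) := by
    rw [pv_pyGetD_toNat r 1 (by omega), pv_pyGetD_toNat r 0 (by omega)]
    norm_num [pvD]
  rw [hinc]
  have hle := List.countP_le_length
    (p := fun i => decide ((decide (PySem.List.pyGetD r (i-1) 0 < PySem.List.pyGetD r i 0)) = decide (0 < pvD r 0)))
    (l := PySem.List.pyRange 2 (r.length : Int) 1)
  rw [hlen] at hle
  have hcond : ∀ i : Int, 2 ≤ i → i < (r.length : Int) →
      (((decide (PySem.List.pyGetD r (i-1) 0 < PySem.List.pyGetD r i 0)) = decide (0 < pvD r 0)) ↔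
        (0 < pvD r (i.toNat - 1) ↔ 0 < pvD r 0)) := by
    intro i h2 hn
    rw [decide_eq_decide]
    rw [pv_pyGetD_toNat r _ (by omega), pv_pyGetD_toNat r _ (by omega)]
    have e2 : (i - 1).toNat = i.toNat - 1 := by omega
    have e : i.toNat - 1 + 1 = i.toNat := by omega
    unfold pvD
    rw [e2, e]
    constructor
    · intro hh; rw [← hh]; omega
    · intro hh; rw [← hh]; omega
  constructor
  · intro hh j h1 hj
    have hcount : (PySem.List.pyRange 2 (r.length : Int) 1).countP
        (fun i => decide ((decide (PySem.List.pyGetD r (i-1) 0 < PySem.List.pyGetD r i 0)) = decide (0 < pvD r 0))) =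
        (PySem.List.pyRange 2 (r.length : Int) 1).length := by
      rw [hlen]; omega
    have hall := List.countP_eq_length.mp hcount
    have hmem : ((j : Int) + 1) ∈ PySem.List.pyRange 2 (r.length : Int) 1 := by
      rw [PySem.List.mem_pyRange_one]; omega
    have := hall _ hmem
    rw [decide_eq_true_eq] at this
    rw [hcond _ (by omega) (by omega)] at this
    have e : ((j : Int) + 1).toNat - 1 = j := by omega
    rwa [e] at this
  · intro hh
    have hall : ∀ i ∈ PySem.List.pyRange 2 (r.length : Int) 1,
        (fun i => decide ((decide (PySem.List.pyGetD r (i-1) 0 < PySem.List.pyGetD r i 0)) = decide (0 < pvD r 0))) i = true := by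
      intro i hi
      rw [PySem.List.mem_pyRange_one] at hi
      rw [decide_eq_true_eq, hcond _ (by omega) (by omega)]
      exact hh (i.toNat - 1) (by omega) (by omega)
    rw [List.countP_eq_length.mpr hall, hlen]
    omega

theorem pvA_safe_iff (r : List Int) (h : 2 ≤ r.length) :
    pvA_check_level_is_safe r = true ↔ pvAll 1 3 r ∨ pvAll (-3) (-1) r := by
  unfold pvA_check_level_is_safe
  rw [Bool.and_eq_true, decide_eq_true_eq, decide_eq_true_eq]
  rw [pvA_dist_iff r h, pvA_mono_iff r h]
  constructor
  · rintro ⟨hd, hm⟩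
    have h0 := hd 0 (by omega)
    by_cases hpos : 0 < pvD r 0
    · left
      intro j hj
      have hdj := hd j hj
      rcases Nat.eq_zero_or_pos j with rfl | hj1
      · omega
      · have := (hm j (by omega) hj).mpr hpos
        omega
    · right
      intro j hj
      have hdj := hd j hj
      rcases Nat.eq_zero_or_pos j with rfl | hj1
      · omega
      · have := (hm j (by omega) hj)
        omega
  · rintro (hall | hall)
    · refine ⟨fun j hj => ?_, fun j h1 hj => ?_⟩
      · have := hall j hj; omega
      · have := hall j hj
        have h0 := hall 0 (by omega)
        constructor <;> intro <;> omega
    · refine ⟨fun j hj => ?_, fun j h1 hj => ?_⟩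
      · have := hall j hj; omega
      · have := hall j hj
        have h0 := hall 0 (by omega)
        constructor <;> intro <;> omega

theorem pvB_dir_two (lo hi : Int) (d : List Int) (hd : d.length = 1) :
    pvB_dir lo hi 2 d = true := by
  rcases d with _ | ⟨x, _ | ⟨y, t⟩⟩ <;> simp at hd
  by_cases hb : lo ≤ x ∧ x ≤ hi <;> simp [pvB_dir, List.scanl, hb]

theorem pvB_iff (r : List Int) (h : 3 ≤ r.length) :
    check_level_is_safe_with_tolerance_alt r = true ↔
      (pvAll 1 3 r ∨ ∃ k < r.length, pvAll 1 3 (r.eraseIdx k)) ∨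
      (pvAll (-3) (-1) r ∨ ∃ k < r.length, pvAll (-3) (-1) (r.eraseIdx k)) := by
  unfold check_level_is_safe_with_tolerance_alt
  rw [if_neg (by omega), Bool.or_eq_true]
  rw [pvB_dir_iff 1 3 r h, pvB_dir_iff (-3) (-1) r h]

theorem pvA_iff (r : List Int) (h : 3 ≤ r.length) :
    check_level_is_safe_with_tolerance r = true ↔
      (pvAll 1 3 r ∨ pvAll (-3) (-1) r) ∨
        ∃ k < r.length, pvAll 1 3 (r.eraseIdx k) ∨ pvAll (-3) (-1) (r.eraseIdx k) := by
  unfold check_level_is_safe_with_tolerance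
  cases hs : pvA_check_level_is_safe r with
  | true =>
    exact iff_of_true (by simp) (Or.inl ((pvA_safe_iff r (by omega)).mp hs))
  | false =>
    simp only [Bool.not_false, if_true]
    have hsafe : ¬(pvAll 1 3 r ∨ pvAll (-3) (-1) r) := fun hc => by
      rw [(pvA_safe_iff r (by omega)).mpr hc] at hs; cases hs
    have hstep : ∀ k : Nat, k < r.length →
        (pvA_check_level_is_safe (((PySem.List.pop? r ((k : Nat) : Int)).getD (0, [])).2) = true ↔
          pvAll 1 3 (r.eraseIdx k) ∨ pvAll (-3) (-1) (r.eraseIdx k)) := by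
      intro k hk
      rw [PySem.List.pop?_natCast r k hk]
      simp only [Option.getD_some]
      rw [pvA_safe_iff (r.eraseIdx k) (by rw [pv_len_erase r k hk]; omega)]
    split_ifs with hany
    · rw [List.any_eq_true] at hany
      obtain ⟨i, hmem, hf⟩ := hany
      rw [PySem.List.len_eq, PySem.List.mem_pyRange_one] at hmem
      obtain ⟨n, rfl⟩ : ∃ n : Nat, i = (n : Int) := ⟨i.toNat, by omega⟩
      have hn : n < r.length := by omega
      rw [hstep n hn] at hf
      exact iff_of_true rfl (Or.inr ⟨n, hn, hf⟩)
    · refine iff_of_false (by simp) ?_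
      rintro (hc | ⟨k, hk, hkall⟩)
      · exact hsafe hc
      · apply hany
        rw [List.any_eq_true]
        refine ⟨(k : Int), ?_, (hstep k hk).mpr hkall⟩
        rw [PySem.List.len_eq, PySem.List.mem_pyRange_one]
        omega

theorem pv_two_case (r : List Int) (h2 : r.length = 2)
    (hs : 1 ≤ |r.getD 1 0 - r.getD 0 0|) (hs3 : |r.getD 1 0 - r.getD 0 0| ≤ 3) :
    check_level_is_safe_with_tolerance r = true ∧
      check_level_is_safe_with_tolerance_alt r = true := by
  have hsafe : pvA_check_level_is_safe r = true := by
    rw [pvA_safe_iff r (by omega)]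
    rcases abs_cases (r.getD 1 0 - r.getD 0 0) with ⟨he, _⟩ | ⟨he, _⟩
    · left
      intro j hj
      have : j = 0 := by omega
      subst this
      unfold pvD
      simp only [Nat.zero_add]
      omega
    · right
      intro j hj
      have : j = 0 := by omega
      subst this
      unfold pvD
      simp only [Nat.zero_add]
      omega
  constructor
  · unfold check_level_is_safe_with_tolerance
    rw [hsafe]
    simp
  · unfold check_level_is_safe_with_tolerance_alt
    rw [if_neg (by omega), h2]
    show (pvB_dir 1 3 2 (List.map (fun i => r.getD (i + 1) 0 - r.getD i 0) (List.range (2 - 1))) ||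
      pvB_dir (-3) (-1) 2 (List.map (fun i => r.getD (i + 1) 0 - r.getD i 0) (List.range (2 - 1)))) = true
    rw [pvB_dir_two 1 3 _ (by simp), Bool.true_or]

-- ===== VERDICT (by name: the statement is the Claim_ definition above) =====
theorem check_level_is_safe_with_tolerance_spec :
    Claim_equal_check_level_is_safe_with_tolerance := by
  intro r _ hpre
  unfold Spec_check_level_is_safe_with_tolerance
  rcases hpre with h3 | ⟨h2, hs, hs3⟩
  · have hA := pvA_iff r h3
    have hB := pvB_iff r h3
    rcases hb : check_level_is_safe_with_tolerance_alt r with _ | _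
    · rcases ha : check_level_is_safe_with_tolerance r with _ | _
      · rfl
      · exfalso
        have := hA.mp ha
        have : (pvAll 1 3 r ∨ ∃ k < r.length, pvAll 1 3 (r.eraseIdx k)) ∨
            (pvAll (-3) (-1) r ∨ ∃ k < r.length, pvAll (-3) (-1) (r.eraseIdx k)) := by
          rcases this with hs | ⟨k, hk, hk'⟩
          · tauto
          · rcases hk' with h | h
            · exact Or.inl (Or.inr ⟨k, hk, h⟩)
            · exact Or.inr (Or.inr ⟨k, hk, h⟩)
        rw [hB.mpr this] at hb; cases hb
    · apply hA.mpr
      have := hB.mp hb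
      rcases this with (hs | ⟨k, hk, h⟩) | (hs | ⟨k, hk, h⟩)
      · exact Or.inl (Or.inl hs)
      · exact Or.inr ⟨k, hk, Or.inl h⟩
      · exact Or.inl (Or.inr hs)
      · exact Or.inr ⟨k, hk, Or.inr h⟩
  · have := pv_two_case r h2 hs hs3
    rw [this.1, this.2]
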